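-- pv_equiv track=rewrite | github.com/daveisagit/aoc2022 | pay14.py | path_gen
-- ===== SOURCE A (Python) =====
-- def path_gen(a,b):
--     """Generate a list of points between 2 points that vertical/horizontally aligned"""
--     if a[0] == b[0]:
--         d = (a[1] < b[1]) - (a[1] > b[1])
--         if d == 0:
--             yield a
--             return
--         for i in range(a[1], b[1]+d, d):
--             yield a[0], i
--     if a[1] == b[1]:
--         d = (a[0] < b[0]) - (a[0] > b[0])
--         for i in range(a[0], b[0]+d, d):
--             yield i, a[1]
-- ===== SOURCE B (Python) =====
-- def path_gen(a, b):
--     """Generate a list of points between 2 points that vertical/horizontally aligned"""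
--     if a[0] != b[0] and a[1] != b[1]:
--         return
--     yield from _seg((a[0], a[1]), (b[0], b[1]))
--
-- def _sgn(x):
--     return (x > 0) - (x < 0)
--
-- def _seg(p, q):
--     # divide and conquer: emit the segment by splitting at its Chebyshev midpoint
--     n = max(abs(q[0] - p[0]), abs(q[1] - p[1]))
--     if n == 0:
--         yield p
--         return
--     dx = _sgn(q[0] - p[0])
--     dy = _sgn(q[1] - p[1])
--     k = n // 2
--     m = (p[0] + dx * k, p[1] + dy * k)
--     yield from _seg(p, m)
--     yield from _seg((m[0] + dx, m[1] + dy), q)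
-- ===== Notes on version B (the rewrite author's own statement) =====
-- stated objective: alternative
-- what changed: Replaces A's linear coordinate-range scans (two branches, each iterating range(start, stop, d)) by a divide-and-conquer generator that recursively splits the segment at its Chebyshev midpoint and concatenates the two halves.
import Mathlib
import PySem

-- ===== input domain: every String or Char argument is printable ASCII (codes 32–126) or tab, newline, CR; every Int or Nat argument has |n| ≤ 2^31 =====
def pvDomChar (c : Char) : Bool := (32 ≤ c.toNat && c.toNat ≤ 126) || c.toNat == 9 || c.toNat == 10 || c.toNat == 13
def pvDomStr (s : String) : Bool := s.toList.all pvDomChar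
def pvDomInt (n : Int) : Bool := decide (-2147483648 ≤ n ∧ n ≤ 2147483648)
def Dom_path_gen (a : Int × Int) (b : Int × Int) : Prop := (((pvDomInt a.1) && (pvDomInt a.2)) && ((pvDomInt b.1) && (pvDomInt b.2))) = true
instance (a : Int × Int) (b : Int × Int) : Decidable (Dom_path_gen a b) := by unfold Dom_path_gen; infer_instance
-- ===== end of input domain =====

-- B replaces A's linear range scans by a divide-and-conquer that splits the segment
-- at its Chebyshev midpoint (objective: alternative algorithm, same total cost).


-- ===== PORT A =====
-- d = (a[1] < b[1]) - (a[1] > b[1]) and the early 'return' after 'yield a' are inlined;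
-- the generator's yields are collected into a list.
def path_gen (a : Int × Int) (b : Int × Int) : List (Int × Int) :=
  if a.1 = b.1 then
    if ((if a.2 < b.2 then (1:Int) else 0) - (if a.2 > b.2 then 1 else 0)) = 0 then [a]
    else
      ((PySem.List.pyRange a.2
          (b.2 + ((if a.2 < b.2 then (1:Int) else 0) - (if a.2 > b.2 then 1 else 0)))
          ((if a.2 < b.2 then (1:Int) else 0) - (if a.2 > b.2 then 1 else 0))).map
        (fun i => (a.1, i))) ++
      (if a.2 = b.2 then
         (PySem.List.pyRange a.1
            (b.1 + ((if a.1 < b.1 then (1:Int) else 0) - (if a.1 > b.1 then 1 else 0)))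
            ((if a.1 < b.1 then (1:Int) else 0) - (if a.1 > b.1 then 1 else 0))).map
           (fun i => (i, a.2))
       else [])
  else
    if a.2 = b.2 then
      (PySem.List.pyRange a.1
         (b.1 + ((if a.1 < b.1 then (1:Int) else 0) - (if a.1 > b.1 then 1 else 0)))
         ((if a.1 < b.1 then (1:Int) else 0) - (if a.1 > b.1 then 1 else 0))).map
        (fun i => (i, a.2))
    else []

-- ===== PORT B =====
-- _sgn from Source B
def pvSgn (x : Int) : Int := (if x > 0 then (1:Int) else 0) - (if x < 0 then 1 else 0)

-- _seg from Source B: divide and conquer, split the segment at its Chebyshev midpoint.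
-- The fuel parameter only makes the recursion structural; pvSeg supplies enough of it
-- (Chebyshev distance + 1) that the base case 0 is never reached.
def pvSegF : Nat → (Int × Int) → (Int × Int) → List (Int × Int)
  | 0, _, _ => []
  | fuel + 1, p, q =>
    let n : Int := max |q.1 - p.1| |q.2 - p.2|
    if n = 0 then [p]
    else
      let dx := pvSgn (q.1 - p.1)
      let dy := pvSgn (q.2 - p.2)
      let k := PySem.Int.floordiv n 2
      let m : Int × Int := (p.1 + dx * k, p.2 + dy * k)
      pvSegF fuel p m ++ pvSegF fuel (m.1 + dx, m.2 + dy) q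

def pvSeg (p : Int × Int) (q : Int × Int) : List (Int × Int) :=
  pvSegF (max (q.1 - p.1).natAbs (q.2 - p.2).natAbs + 1) p q

def path_gen_alt (a : Int × Int) (b : Int × Int) : List (Int × Int) :=
  if a.1 ≠ b.1 ∧ a.2 ≠ b.2 then []
  else pvSeg (a.1, a.2) (b.1, b.2)

-- ===== PRECONDITION & SPEC =====
def Spec_path_gen (a : Int × Int) (b : Int × Int) (out : List (Int × Int)) : Prop := out = path_gen_alt a b
instance (a : Int × Int) (b : Int × Int) (out : List (Int × Int)) : Decidable (Spec_path_gen a b out) := by unfold Spec_path_gen; infer_instance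

-- ===== CLAIM =====
def Claim_equal_path_gen : Prop := ∀ (a : Int × Int) (b : Int × Int), Dom_path_gen a b → Spec_path_gen a b (path_gen a b)

-- ===== LEMMAS AND PROOFS =====

-- the divide-and-conquer segment equals the step-indexed straight line, for unit directions
theorem pvSegF_eq (n : Nat) : ∀ (fuel : Nat), n < fuel → ∀ (p : Int × Int) (dx dy : Int),
    (dx = -1 ∨ dx = 0 ∨ dx = 1) → (dy = -1 ∨ dy = 0 ∨ dy = 1) →
    (dx ≠ 0 ∨ dy ≠ 0 ∨ n = 0) →
    pvSegF fuel p (p.1 + dx * n, p.2 + dy * n) =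
      (List.range (n + 1)).map (fun (i : Nat) => (p.1 + dx * (i : Int), p.2 + dy * (i : Int))) := by
  induction n using Nat.strong_induction_on with
  | _ n IH =>
    intro fuel hf p dx dy hdx hdy hne
    obtain ⟨f, rfl⟩ : ∃ f, fuel = f + 1 := ⟨fuel - 1, by omega⟩
    have hN : max |dx * (n:Int)| |dy * (n:Int)| = (n:Int) := by
      rcases hdx with h | h | h <;> rcases hdy with h' | h' | h' <;>
        subst h <;> subst h' <;> simp_all
    rw [pvSegF]
    simp only [add_sub_cancel_left, hN]
    by_cases hn0 : n = 0
    · subst hn0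
      simp
    · have hpos : 0 < n := Nat.pos_of_ne_zero hn0
      have hd : dx ≠ 0 ∨ dy ≠ 0 := by
        rcases hne with h | h | h
        · exact Or.inl h
        · exact Or.inr h
        · omega
      rw [if_neg (by exact_mod_cast hn0)]
      have hsx : pvSgn (dx * (n:Int)) = dx := by
        rcases hdx with h | h | h <;> subst h <;> simp [pvSgn] <;> omega
      have hsy : pvSgn (dy * (n:Int)) = dy := by
        rcases hdy with h | h | h <;> subst h <;> simp [pvSgn] <;> omega
      have hk : PySem.Int.floordiv (n:Int) 2 = ((n / 2 : Nat) : Int) := by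
        rw [PySem.Int.floordiv_eq_ediv_of_pos (by omega : (0:Int) < 2)]
        omega
      simp only [hsx, hsy, hk]
      have IH1 := IH (n / 2) (by omega) f (by omega) p dx dy hdx hdy (by tauto)
      have IH2 := IH (n - n / 2 - 1) (by omega) f (by omega)
        (p.1 + dx * ((n / 2 : Nat) + 1), p.2 + dy * ((n / 2 : Nat) + 1)) dx dy hdx hdy (by tauto)
      have h2 : pvSegF f (p.1 + dx * ((n / 2 : Nat) : Int) + dx, p.2 + dy * ((n / 2 : Nat) : Int) + dy)
            (p.1 + dx * (n:Int), p.2 + dy * (n:Int)) =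
          (List.range (n - n / 2 - 1 + 1)).map
            (fun (i : Nat) => (p.1 + dx * ((n / 2 : Nat) + 1) + dx * (i : Int),
                       p.2 + dy * ((n / 2 : Nat) + 1) + dy * (i : Int))) := by
        have e : ((p.1 + dx * ((n / 2 : Nat) + 1), p.2 + dy * ((n / 2 : Nat) + 1)) : Int × Int) =
            (p.1 + dx * ((n / 2 : Nat) : Int) + dx, p.2 + dy * ((n / 2 : Nat) : Int) + dy) := by
          simp only [Prod.mk.injEq]
          exact ⟨by push_cast; ring, by push_cast; ring⟩
        have e' : ((p.1 + dx * ((n / 2 : Nat) + 1) + dx * ((n - n / 2 - 1 : Nat) : Int),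
                    p.2 + dy * ((n / 2 : Nat) + 1) + dy * ((n - n / 2 - 1 : Nat) : Int)) : Int × Int) =
            (p.1 + dx * (n:Int), p.2 + dy * (n:Int)) := by
          have : ((n - n / 2 - 1 : Nat) : Int) = (n:Int) - ((n / 2 : Nat) : Int) - 1 := by omega
          rw [this]
          simp only [Prod.mk.injEq]
          exact ⟨by push_cast; ring, by push_cast; ring⟩
        dsimp only at IH2
        rw [e, e'] at IH2
        exact IH2
      rw [IH1, h2]
      conv_rhs => rw [show n + 1 = (n / 2 + 1) + (n - n / 2) from by omega, List.range_add,
        List.map_append, List.map_map]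
      congr 1
      rw [show n - n / 2 - 1 + 1 = n - n / 2 from by omega]
      apply List.map_congr_left
      intro i _
      simp only [Function.comp, Prod.mk.injEq]
      exact ⟨by push_cast; ring, by push_cast; ring⟩

theorem pvSeg_eq (n : Nat) (p : Int × Int) (dx dy : Int)
    (hdx : dx = -1 ∨ dx = 0 ∨ dx = 1) (hdy : dy = -1 ∨ dy = 0 ∨ dy = 1)
    (hne : dx ≠ 0 ∨ dy ≠ 0 ∨ n = 0) :
    pvSeg p (p.1 + dx * n, p.2 + dy * n) =
      (List.range (n + 1)).map (fun (i : Nat) => (p.1 + dx * (i : Int), p.2 + dy * (i : Int))) := by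
  have hfit : n < max ((p.1 + dx * (n:Int), p.2 + dy * (n:Int)).1 - p.1).natAbs
      ((p.1 + dx * (n:Int), p.2 + dy * (n:Int)).2 - p.2).natAbs + 1 := by
    dsimp only
    rcases hdx with h | h | h <;> rcases hdy with h' | h' | h' <;>
      subst h <;> subst h' <;> simp_all
  exact pvSegF_eq n _ hfit p dx dy hdx hdy hne

-- pvSeg along each of the four axis directions equals A's inclusive coordinate range
theorem pv_up (c s t : Int) (h : s < t) :
    pvSeg (c, s) (c, t) = (PySem.List.pyRange s (t + 1) 1).map (fun i => (c, i)) := by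
  have hb : ((c, t) : Int × Int) = ((c, s).1 + 0 * ((t - s).toNat : Int), (c, s).2 + 1 * ((t - s).toNat : Int)) := by
    simp only [Prod.mk.injEq]
    constructor <;> omega
  rw [hb, pvSeg_eq ((t - s).toNat) (c, s) 0 1 (by omega) (by omega) (by omega)]
  rw [PySem.List.pyRange_one, List.map_map]
  rw [show (t + 1 - s).toNat = (t - s).toNat + 1 from by omega]
  apply List.map_congr_left
  intro k _
  simp only [Function.comp, Prod.mk.injEq]
  constructor <;> omega

theorem pv_down (c s t : Int) (h : t < s) :
    pvSeg (c, s) (c, t) = (PySem.List.pyRange s (t - 1) (-1)).map (fun i => (c, i)) := by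
  have hb : ((c, t) : Int × Int) = ((c, s).1 + 0 * ((s - t).toNat : Int), (c, s).2 + (-1) * ((s - t).toNat : Int)) := by
    simp only [Prod.mk.injEq]
    constructor <;> omega
  rw [hb, pvSeg_eq ((s - t).toNat) (c, s) 0 (-1) (by omega) (by omega) (by omega)]
  rw [PySem.List.pyRange_neg_one, List.map_map]
  rw [show (s - (t - 1)).toNat = (s - t).toNat + 1 from by omega]
  apply List.map_congr_left
  intro k _
  simp only [Function.comp, Prod.mk.injEq]
  constructor <;> omega

theorem pv_right (c s t : Int) (h : s < t) :
    pvSeg (s, c) (t, c) = (PySem.List.pyRange s (t + 1) 1).map (fun i => (i, c)) := by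
  have hb : ((t, c) : Int × Int) = ((s, c).1 + 1 * ((t - s).toNat : Int), (s, c).2 + 0 * ((t - s).toNat : Int)) := by
    simp only [Prod.mk.injEq]
    constructor <;> omega
  rw [hb, pvSeg_eq ((t - s).toNat) (s, c) 1 0 (by omega) (by omega) (by omega)]
  rw [PySem.List.pyRange_one, List.map_map]
  rw [show (t + 1 - s).toNat = (t - s).toNat + 1 from by omega]
  apply List.map_congr_left
  intro k _
  simp only [Function.comp, Prod.mk.injEq]
  constructor <;> omega

theorem pv_left (c s t : Int) (h : t < s) :
    pvSeg (s, c) (t, c) = (PySem.List.pyRange s (t - 1) (-1)).map (fun i => (i, c)) := by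
  have hb : ((t, c) : Int × Int) = ((s, c).1 + (-1) * ((s - t).toNat : Int), (s, c).2 + 0 * ((s - t).toNat : Int)) := by
    simp only [Prod.mk.injEq]
    constructor <;> omega
  rw [hb, pvSeg_eq ((s - t).toNat) (s, c) (-1) 0 (by omega) (by omega) (by omega)]
  rw [PySem.List.pyRange_neg_one, List.map_map]
  rw [show (s - (t - 1)).toNat = (s - t).toNat + 1 from by omega]
  apply List.map_congr_left
  intro k _
  simp only [Function.comp, Prod.mk.injEq]
  constructor <;> omega

-- the degenerate segment
theorem pv_point (p : Int × Int) : pvSeg p p = [p] := by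
  simp [pvSeg, pvSegF]

-- ===== VERDICT =====
theorem path_gen_spec : Claim_equal_path_gen := by
  intro a b _
  obtain ⟨a1, a2⟩ := a
  obtain ⟨b1, b2⟩ := b
  unfold Spec_path_gen path_gen path_gen_alt
  by_cases hx : a1 = b1
  · subst hx
    by_cases hy : a2 = b2
    · subst hy
      norm_num [pv_point]
    · by_cases hlt : a2 < b2
      · rw [pv_up a1 a2 b2 hlt]
        norm_num [hlt, hy, show ¬ a2 > b2 from by omega]
      · rw [pv_down a1 a2 b2 (by omega)]
        norm_num [hlt, hy, show a2 > b2 from by omega, show b2 + -1 = b2 - 1 from by ring]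
  · by_cases hy : a2 = b2
    · subst hy
      by_cases hlt : a1 < b1
      · rw [pv_right a2 a1 b1 hlt]
        norm_num [hlt, hx, show ¬ a1 > b1 from by omega]
      · rw [pv_left a2 a1 b1 (by omega)]
        norm_num [hlt, hx, show a1 > b1 from by omega, show b1 + -1 = b1 - 1 from by ring]
    · norm_num [hx, hy]
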